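-- pv_equiv track=rewrite | github.com/AhmedNabilKotb/python-content-pipeline | scripts/helpers/outbound_links.py | _tld_allowed
-- ===== SOURCE A (Python) =====
-- from typing import Dict, List, Tuple, Iterable, Optional, Any, Union
--
-- def _tld_allowed(domain: str, allowed_tlds: Iterable[str]) -> bool:
--     if not allowed_tlds:
--         return True
--     d = domain or ""
--     for tld in allowed_tlds:
--         tld = (tld or "").strip().lower()
--         if not tld:
--             continue
--         if not tld.startswith("."):
--             tld = "." + tld
--         if d.endswith(tld):
--             return True
--     return False
-- ===== SOURCE B (Python) =====
-- def _tld_allowed(domain, allowed_tlds):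
--     if not allowed_tlds:
--         return True
--     tlds = set()
--     for tld in allowed_tlds:
--         t = (tld or "").strip().lower()
--         if t:
--             tlds.add(t if t.startswith(".") else "." + t)
--     d = domain or ""
--     return any(d[i:] in tlds for i in range(len(d)) if d[i] == ".")
-- ===== Notes on version B (the rewrite author's own statement) =====
-- stated objective: alternative
-- what changed: Replaces A's per-TLD endswith loop with early return by a different matching algorithm: build a hash set of the normalized '.tld' suffixes once, then enumerate the dot positions of the domain and test each dot-suffix of the domain for set membership, so the inner per-candidate suffix comparison against the domain disappears.
import Mathlib
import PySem

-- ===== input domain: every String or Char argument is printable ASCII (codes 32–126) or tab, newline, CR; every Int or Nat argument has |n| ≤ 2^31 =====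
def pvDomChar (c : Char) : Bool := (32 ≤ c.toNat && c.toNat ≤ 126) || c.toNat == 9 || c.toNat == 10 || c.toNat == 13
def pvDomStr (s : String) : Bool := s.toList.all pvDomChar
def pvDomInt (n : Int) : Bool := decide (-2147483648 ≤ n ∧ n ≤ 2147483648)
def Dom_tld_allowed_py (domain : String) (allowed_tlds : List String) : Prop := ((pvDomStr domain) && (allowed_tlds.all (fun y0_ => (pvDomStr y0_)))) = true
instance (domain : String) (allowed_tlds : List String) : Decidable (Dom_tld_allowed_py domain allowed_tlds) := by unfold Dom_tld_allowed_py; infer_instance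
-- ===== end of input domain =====

-- B replaces A's per-TLD endswith loop by a different matching algorithm: it builds a
-- hash SET of normalized '.tld' suffixes once and then enumerates the dot-positions of
-- the domain, testing each dot-suffix of the domain for set membership — the inner
-- scan over TLDs disappears (alternative, same asymptotic cost at these sizes).

-- ===== PORT A =====
-- the `for tld in allowed_tlds: …` loop with its early `return True`
def tldLoopA (d : String) : List String → Bool
  | [] => false
  | t :: rest =>
      let tld := PySem.Str.lower (PySem.Str.strip t)   -- (tld or "").strip().lower()
      if tld.isEmpty then tldLoopA d rest              -- if not tld: continue
      else
        let tld' := if PySem.Str.startswith tld "." then tld else "." ++ tld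
        if PySem.Str.endswith d tld' then true else tldLoopA d rest

def tld_allowed_py (domain : String) (allowed_tlds : List String) : Bool :=
  if allowed_tlds.isEmpty then true
  else
    let d := domain                                    -- d = domain or ""
    tldLoopA d allowed_tlds

-- ===== PORT B =====
-- the normalization loop building the Python set `tlds`
def tldSetB (allowed_tlds : List String) : PySem.Set String :=
  allowed_tlds.foldl (fun s tld =>
    let t := PySem.Str.lower (PySem.Str.strip tld)
    if t.isEmpty then s
    else PySem.Set.add s (if PySem.Str.startswith t "." then t else "." ++ t))
    PySem.Set.empty

def tld_allowed_py_alt (domain : String) (allowed_tlds : List String) : Bool :=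
  if allowed_tlds.isEmpty then true
  else
    let tlds := tldSetB allowed_tlds
    let cs := domain.toList                            -- d = domain or ""
    -- any(d[i:] in tlds for i in range(len(d)) if d[i] == ".")
    (List.range cs.length).any (fun i =>
      (cs[i]? == some '.') && PySem.Set.contains tlds (String.ofList (cs.drop i)))

-- ===== PRECONDITION & SPEC =====
def Spec_tld_allowed_py (domain : String) (allowed_tlds : List String) (out : Bool) : Prop := out = tld_allowed_py_alt domain allowed_tlds
instance (domain : String) (allowed_tlds : List String) (out : Bool) : Decidable (Spec_tld_allowed_py domain allowed_tlds out) := by unfold Spec_tld_allowed_py; infer_instance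

-- ===== CLAIM (what is proved, stated in full; the proofs are below) =====
def Claim_equal_tld_allowed_py : Prop := ∀ (domain : String) (allowed_tlds : List String), Dom_tld_allowed_py domain allowed_tlds → Spec_tld_allowed_py domain allowed_tlds (tld_allowed_py domain allowed_tlds)

-- ===== LEMMAS AND PROOFS =====

-- proof-side helper: the list of normalized '.tld' suffixes, in order
def tldSuffixes : List String → List String
  | [] => []
  | t :: rest =>
      if (PySem.Str.lower (PySem.Str.strip t)).isEmpty then tldSuffixes rest
      else (if PySem.Str.startswith (PySem.Str.lower (PySem.Str.strip t)) "." then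
              PySem.Str.lower (PySem.Str.strip t)
            else "." ++ PySem.Str.lower (PySem.Str.strip t)) :: tldSuffixes rest

theorem tldLoopA_eq_any (d : String) (l : List String) :
    tldLoopA d l = (tldSuffixes l).any (fun suf => PySem.Str.endswith d suf) := by
  induction l with
  | nil => rfl
  | cons t rest ih =>
      simp only [tldLoopA, tldSuffixes]
      cases h1 : (PySem.Str.lower (PySem.Str.strip t)).isEmpty
      · simp only [Bool.false_eq_true, if_false, List.any_cons, ← ih]
        cases PySem.Str.endswith d
            (if PySem.Str.startswith (PySem.Str.lower (PySem.Str.strip t)) "." then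
              PySem.Str.lower (PySem.Str.strip t)
            else "." ++ PySem.Str.lower (PySem.Str.strip t)) <;> simp
      · simp only [if_true]; exact ih

theorem tldSetB_foldl (l : List String) (s : PySem.Set String) :
    (l.foldl (fun s tld =>
        let t := PySem.Str.lower (PySem.Str.strip tld)
        if t.isEmpty then s
        else PySem.Set.add s (if PySem.Str.startswith t "." then t else "." ++ t)) s)
      = (tldSuffixes l).foldl PySem.Set.add s := by
  induction l generalizing s with
  | nil => simp only [List.foldl_nil, tldSuffixes]
  | cons t rest ih =>
      simp only [List.foldl_cons, tldSuffixes]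
      cases h1 : (PySem.Str.lower (PySem.Str.strip t)).isEmpty
      · simp only [Bool.false_eq_true, if_false, List.foldl_cons]; exact ih _
      · simp only [if_true]; exact ih _

theorem tldSetB_eq_ofList (l : List String) :
    tldSetB l = PySem.Set.ofList (tldSuffixes l) := by
  rw [PySem.Set.ofList_eq_foldl]
  exact tldSetB_foldl l PySem.Set.empty

-- every normalized suffix is nonempty and starts with '.'
theorem tldSuffixes_head (l : List String) :
    ∀ t ∈ tldSuffixes l, t.toList.head? = some '.' := by
  induction l with
  | nil => intro t ht; simp [tldSuffixes] at ht
  | cons x rest ih =>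
      intro t ht
      cases h1 : (PySem.Str.lower (PySem.Str.strip x)).isEmpty
      · simp only [tldSuffixes, h1, Bool.false_eq_true, if_false, List.mem_cons] at ht
        rcases ht with h | h
        · by_cases h2 : PySem.Str.startswith (PySem.Str.lower (PySem.Str.strip x)) "."
          · rw [if_pos h2] at h
            have := (PySem.Chars.startswith_iff _ _).1 (by simpa using h2)
            rcases this with ⟨rest', hr⟩
            simp only [List.singleton_append] at hr
            rw [h]
            simp only [PySem.Str.toList_lower, PySem.Str.toList_strip]
            rw [← hr]
            rfl
          · rw [if_neg h2] at h
            rw [h, String.toList_append, show (".":String).toList = ['.'] from rfl]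
            rfl
        · exact ih t h
      · simp only [tldSuffixes, h1, if_true] at ht
        exact ih t ht

-- the dot-suffix scan over the domain equals the multi-suffix endswith test
theorem matchB_eq (d : String) (suffixes : List String)
    (hh : ∀ t ∈ suffixes, t.toList.head? = some '.') :
    ((List.range d.toList.length).any (fun i =>
        (d.toList[i]? == some '.') &&
        PySem.Set.contains (PySem.Set.ofList suffixes) (String.ofList (d.toList.drop i))))
      = suffixes.any (fun suf => PySem.Str.endswith d suf) := by
  apply Bool.eq_iff_iff.2
  simp only [List.any_eq_true, List.mem_range, Bool.and_eq_true, beq_iff_eq,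
    PySem.Set.contains, List.contains_eq_mem, PySem.Set.mem_ofList, decide_eq_true_eq]
  constructor
  · rintro ⟨i, hi, hdot, hmem⟩
    refine ⟨String.ofList (d.toList.drop i), hmem, ?_⟩
    simp only [PySem.Str.endswith_eq, String.toList_ofList]
    exact (PySem.Chars.endswith_iff _ _).2 (List.drop_suffix i d.toList)
  · rintro ⟨t, hmem, hend⟩
    have hsuf : t.toList <:+ d.toList :=
      (PySem.Chars.endswith_iff _ _).1 (by simpa using hend)
    rcases hsuf with ⟨u, hu⟩
    have hhead := hh t hmem
    rcases List.head?_eq_some_iff.1 hhead with ⟨tl, htl⟩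
    refine ⟨u.length, ?_, ?_, ?_⟩
    · have hlen : d.toList.length = u.length + t.toList.length := by
        rw [← hu, List.length_append]
      rw [hlen, htl]; simp
    · rw [← hu, List.getElem?_append_right (le_refl u.length)]
      simp [htl]
    · rw [← hu, List.drop_left, String.ofList_toList]
      exact hmem

-- ===== VERDICT (by name: the statement is the Claim_ definition above) =====
theorem tld_allowed_py_spec : Claim_equal_tld_allowed_py := by
  intro domain allowed_tlds _
  unfold Spec_tld_allowed_py tld_allowed_py tld_allowed_py_alt
  by_cases h : allowed_tlds.isEmpty
  · simp [h]
  · simp only [h, Bool.false_eq_true, if_false]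
    rw [tldLoopA_eq_any, tldSetB_eq_ofList,
        matchB_eq domain _ (tldSuffixes_head allowed_tlds)]
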